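-- pv_equiv track=rewrite | github.com/devansh20la/Algorithms | google_card/Array&Strings/multiply-strings.py | add_results
-- ===== SOURCE A (Python) =====
-- def add_results(results):
--     sum_total = results[0]
--
--     for value in results[1:]:
--
--         if len(value) < len(sum_total):
--             value = value + ["0"]*(len(sum_total) - len(value))
--         elif len(value) > len(sum_total):
--             sum_total = sum_total + [0]*(-len(sum_total) + len(value))
--
--         assert len(sum_total) == len(value)
--
--         carry = 0
--         for i in range(len(value)):
--             ans = int(sum_total[i]) + int(value[i]) + carry
--             sum_total[i] = str(ans % 10)
--             carry = ans // 10
--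
--         if carry > 0:
--             sum_total.append(str(carry))
--
--     return "".join(sum_total[::-1])
-- ===== SOURCE B (Python) =====
-- def value(arr):
--     """Integer value of a little-endian digit array."""
--     return sum(int(d) * 10 ** i for i, d in enumerate(arr))
--
--
-- def to_digits(n, width):
--     """Little-endian digit array of n, at least `width` digits long."""
--     digits = []
--     while len(digits) < width or n:
--         n, d = divmod(n, 10)
--         digits.append(str(d))
--     return digits
--
--
-- def add_results(results):
--     total = results[0]
--     for arr in results[1:]:
--         width = max(len(total), len(arr))
--         total = to_digits(value(total) + value(arr), width)
--     return "".join(reversed(total))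
-- ===== Notes on version B (the rewrite author's own statement) =====
-- stated objective: alternative
-- what changed: Each fold step now converts the two little-endian arrays to integers, adds them, and materialises the digit array of the sum (at least as wide as the operands), replacing A's pad-to-equal-length, per-digit add-with-carry loop that mutates results[0] in place; Pre_ restricts multi-array inputs to single decimal-digit cells and so excludes inputs where A returns only by accident of re-parsing its own cells (signed or otherwise int()-parsable entries).
-- outside the precondition, e.g. on add_results([['-5'], ['0']]): A returns '5', B does not finish within the time limit
import Mathlib
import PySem

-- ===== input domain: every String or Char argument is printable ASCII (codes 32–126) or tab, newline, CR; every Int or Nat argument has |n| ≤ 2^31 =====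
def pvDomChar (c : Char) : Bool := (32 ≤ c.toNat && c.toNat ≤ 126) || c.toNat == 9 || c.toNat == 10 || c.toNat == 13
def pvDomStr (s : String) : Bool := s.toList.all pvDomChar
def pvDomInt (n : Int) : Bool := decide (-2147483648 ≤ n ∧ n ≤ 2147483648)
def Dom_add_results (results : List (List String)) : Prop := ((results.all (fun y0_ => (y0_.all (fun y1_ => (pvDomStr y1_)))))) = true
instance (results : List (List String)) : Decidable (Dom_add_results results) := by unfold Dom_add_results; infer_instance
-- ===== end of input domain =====

-- B replaces A's in-place pad-and-carry digit loop by a fold whose step converts the two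
-- arrays to integers, adds them, and materialises the digit array of the sum (objective:
-- alternative). A mutates results[0] in place; B does not — the equivalence proved is about
-- the return value only.


-- ===== PORT A =====
-- int(s); Pre_ guarantees every parsed string is a decimal digit, where ofStr? is exact
def pvIntD (s : String) : Int := (PySem.Int.ofStr? s).getD 0

-- the body of A's inner `for i in range(len(value))` loop (state: (sum_total, carry))
def pvStepF (v : List String) (p : List String × Int) (i : Int) : List String × Int :=
  let ans := pvIntD (PySem.List.pyGetD p.1 i "") + pvIntD (PySem.List.pyGetD v i "") + p.2
  (PySem.List.pySetD p.1 i (PySem.Int.toStr (PySem.Int.mod ans 10)), PySem.Int.floordiv ans 10)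

-- one iteration of A's outer `for value in results[1:]` loop.
-- Python pads sum_total with int-0 cells ([0]*k); ported as "0": int(0) = int("0") and every
-- padded cell is overwritten by the inner loop (range(len(value)) covers it) before the join.
def add_results_step (st : List String) (value : List String) : List String :=
  let v := if value.length < st.length
           then value ++ List.replicate (st.length - value.length) "0"
           else value
  let st1 := if st.length < value.length
             then st ++ List.replicate (value.length - st.length) "0"
             else st
  let r := (PySem.List.pyRange 0 (PySem.List.len v) 1).foldl (pvStepF v) (st1, 0)
  if r.2 > 0 then r.1 ++ [PySem.Int.toStr r.2] else r.1

def add_results (results : List (List String)) : String :=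
  let sum_total := PySem.List.pyGetD results 0 []   -- results[0]; the IndexError on [] is outside Pre_
  let sum_total := (PySem.List.slice results (some 1) none).foldl add_results_step sum_total
  PySem.Str.join "" ((PySem.List.slice? sum_total none none (-1)).getD [])

-- ===== PORT B =====
-- value(arr): sum(int(d) * 10 ** i for i, d in enumerate(arr)); i ≥ 0, so 10 ** i is the Nat power (exact here)
def pvValue (arr : List String) : Int :=
  ((PySem.List.enumerate arr).map (fun p => pvIntD p.2 * 10 ^ p.1.toNat)).sum

-- to_digits(n, width): the while loop `while len(digits) < width or n`, built front-to-back.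
-- The guard is `n ≤ 0` where Python tests `n`: for n < 0 Python never terminates (divmod keeps
-- n at -1), which Pre_ excludes; exact for n ≥ 0.
def pvToDigitsB (width : Int) (n : Int) : List String :=
  if width ≤ 0 ∧ n ≤ 0 then []
  else PySem.Int.toStr (PySem.Int.mod n 10) :: pvToDigitsB (width - 1) (PySem.Int.floordiv n 10)
termination_by (width.toNat + n.toNat)
decreasing_by
  rw [PySem.Int.floordiv_eq_ediv_of_pos (by omega)]
  omega

-- the body of B's `for arr in results[1:]` loop
def pvAltStep (total arr : List String) : List String :=
  pvToDigitsB (max (PySem.List.len total) (PySem.List.len arr)) (pvValue total + pvValue arr)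

def add_results_alt (results : List (List String)) : String :=
  let total := PySem.List.pyGetD results 0 []   -- results[0]; the IndexError on [] is outside Pre_
  let total := (PySem.List.slice results (some 1) none).foldl pvAltStep total
  PySem.Str.join "" total.reverse               -- "".join(reversed(total))

-- ===== PRECONDITION & SPEC =====
def pvDigitStrs : List String := ["0", "1", "2", "3", "4", "5", "6", "7", "8", "9"]

-- Pre_ restricts to the function's natural domain: a nonempty list of little-endian digit
-- arrays — either a lone array (returned verbatim, nothing is parsed) or arrays whose cells
-- are single decimal-digit strings. A also happens to return on arrays of other
-- int()-parsable cells (signs, whitespace/underscores, multi-digit entries), where its value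
-- is an accident of re-parsing its own cells (negative carries silently dropped); B's loop
-- does not terminate on a negative total.
def Pre_add_results (results : List (List String)) : Prop :=
  results ≠ [] ∧ (results.length = 1 ∨ ∀ arr ∈ results, ∀ s ∈ arr, s ∈ pvDigitStrs)
instance (results : List (List String)) : Decidable (Pre_add_results results) := by
  unfold Pre_add_results; infer_instance

def pvWitness_add_results : List (List String) := [["1", "2"], ["9"]]

def Spec_add_results (results : List (List String)) (out : String) : Prop := out = add_results_alt results
instance (results : List (List String)) (out : String) : Decidable (Spec_add_results results out) := by
  unfold Spec_add_results; infer_instance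

-- ===== CLAIM (what is proved, stated in full; the proofs are below) =====
def Claim_equal_add_results : Prop := ∀ (results : List (List String)), Dom_add_results results → Pre_add_results results → Spec_add_results results (add_results results)

-- ===== LEMMAS AND PROOFS =====

-- abbreviation for the Pre_ digit condition on one array
def pvAllDigit (arr : List String) : Prop := ∀ s ∈ arr, s ∈ pvDigitStrs

-- the Nat value of a little-endian digit array
def pvVal : List String → Nat
  | [] => 0
  | s :: l => (pvIntD s).toNat + 10 * pvVal l

-- canonical little-endian list of digit strings of S, padded/truncated to width w
def pvCanon : Nat → Nat → List String
  | 0, _ => []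
  | w + 1, S => PySem.Int.toStr ((S % 10 : Nat) : Int) :: pvCanon w (S / 10)

-- number of decimal digits of S (0 for 0)
def pvNd (S : Nat) : Nat := if S = 0 then 0 else Nat.log 10 S + 1

-- structural zip-with-carry form of A's inner loop
def pvAddDigits : List String → List String → Int → List String × Int
  | a :: l, b :: v, c =>
    let ans := pvIntD a + pvIntD b + c
    let r := pvAddDigits l v (PySem.Int.floordiv ans 10)
    (PySem.Int.toStr (PySem.Int.mod ans 10) :: r.1, r.2)
  | _, _, c => ([], c)

-- running maximum of array lengths / running sum of array values
def pvMaxLen (M : Nat) (rest : List (List String)) : Nat := rest.foldl (fun m a => max m a.length) M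
def pvSum (rest : List (List String)) : Nat := (rest.map pvVal).sum

-- ---- digit string facts ----
theorem pvIntD_digit {s : String} (h : s ∈ pvDigitStrs) :
    pvIntD s = ((pvIntD s).toNat : Int) ∧ (pvIntD s).toNat < 10 ∧
      PySem.Int.toStr (pvIntD s) = s := by
  fin_cases h <;> refine ⟨by decide, by decide, by decide⟩

theorem pvIntD_toStr_digit {d : Nat} (h : d < 10) :
    pvIntD (PySem.Int.toStr (d : Int)) = (d : Int) := by
  interval_cases d <;> decide

-- ---- pvNd ----
theorem pvNd_eq_zero_iff (S : Nat) : pvNd S = 0 ↔ S = 0 := by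
  unfold pvNd
  split_ifs with h
  · simp [h]
  · simp [h]

theorem pvNd_step {S : Nat} (h : 10 ≤ S) : pvNd S = pvNd (S / 10) + 1 := by
  have h1 : ¬ S = 0 := by omega
  have h2 : ¬ S / 10 = 0 := by omega
  unfold pvNd
  simp only [h1, h2, if_false]
  have e : Nat.log 10 (S / 10) = Nat.log 10 S - 1 := Nat.log_div_base (b := 10) (n := S)
  have hp : 0 < Nat.log 10 S := Nat.log_pos (by omega) h
  omega

theorem pvNd_small {S : Nat} (h1 : 0 < S) (h2 : S < 10) : pvNd S = 1 := by
  unfold pvNd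
  simp only [Nat.pos_iff_ne_zero.mp h1, if_false]
  have : Nat.log 10 S = 0 := Nat.log_eq_zero_iff.mpr (Or.inl h2)
  omega

theorem pvLt_pow_iff_nd_le : ∀ (w S : Nat), S < 10 ^ w ↔ pvNd S ≤ w := by
  intro w S
  by_cases h : S = 0
  · subst h
    simp [pvNd]
  · unfold pvNd
    rw [if_neg h, ← Nat.log_lt_iff_lt_pow (by omega) h]
    omega

theorem pvNd_mono {S T : Nat} (h : S ≤ T) : pvNd S ≤ pvNd T := by
  rw [← pvLt_pow_iff_nd_le]
  have hT : T < 10 ^ pvNd T := (pvLt_pow_iff_nd_le (pvNd T) T).mpr le_rfl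
  omega

-- ---- pvCanon ----
theorem pvCanon_length : ∀ (w S : Nat), (pvCanon w S).length = w := by
  intro w
  induction w with
  | zero => intro S; rfl
  | succ w ih => intro S; simp [pvCanon, ih]

theorem pvCanon_zero : ∀ (w : Nat), pvCanon w 0 = List.replicate w "0" := by
  intro w
  induction w with
  | zero => rfl
  | succ w ih => simp [pvCanon, ih, List.replicate_succ]; decide

theorem pvCanon_append : ∀ (w k S : Nat),
    pvCanon (w + k) S = pvCanon w (S % 10 ^ w) ++ pvCanon k (S / 10 ^ w) := by
  intro w
  induction w with
  | zero => intro k S; simp [pvCanon]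
  | succ w ih =>
    intro k S
    have e1 : w + 1 + k = (w + k) + 1 := by omega
    rw [e1]
    simp only [pvCanon]
    have h10 : (10:Nat) ^ (w + 1) = 10 * 10 ^ w := by ring
    have e2 : S % 10 ^ (w + 1) % 10 = S % 10 := by
      rw [h10, Nat.mod_mod_of_dvd _ ⟨10 ^ w, rfl⟩]
    have e3 : S % 10 ^ (w + 1) / 10 = S / 10 % 10 ^ w := by
      rw [h10, Nat.mod_mul_right_div_self]
    have e4 : S / 10 ^ (w + 1) = S / 10 / 10 ^ w := by
      rw [h10, Nat.div_div_eq_div_mul]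
    rw [e2, e3, e4, ih k (S / 10)]
    rfl

theorem pvAllDigit_canon {arr : List String} (h : pvAllDigit arr) :
    arr = pvCanon arr.length (pvVal arr) ∧ pvVal arr < 10 ^ arr.length := by
  induction arr with
  | nil => exact ⟨rfl, by simp [pvVal]⟩
  | cons s l ih =>
    have hs := pvIntD_digit (h s (List.mem_cons_self))
    obtain ⟨ihc, ihb⟩ := ih (fun x hx => h x (List.mem_cons_of_mem _ hx))
    have hd : (pvIntD s).toNat < 10 := hs.2.1
    constructor
    · simp only [pvVal, List.length_cons, pvCanon]
      have e1 : ((pvIntD s).toNat + 10 * pvVal l) % 10 = (pvIntD s).toNat := by omega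
      have e2 : ((pvIntD s).toNat + 10 * pvVal l) / 10 = pvVal l := by omega
      have e3 : PySem.Int.toStr ((((pvIntD s).toNat : Nat)) : Int) = s := by
        rw [← hs.1, hs.2.2]
      rw [e1, e2, e3, ← ihc]
    · simp only [pvVal, List.length_cons, pow_succ]
      omega

-- ---- inner loop = pvAddDigits ----
theorem pvStepF_shift (b x : String) (v l : List String) (c : Int) (k : Nat) :
    pvStepF (b :: v) (x :: l, c) ((k : Int) + 1) = (pvStepF v (l, c) (k : Int)).map (x :: ·) id := by
  have e : ((k : Int) + 1) = (((k + 1 : Nat)) : Int) := by push_cast; ring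
  simp only [pvStepF]
  rw [e]
  simp only [PySem.List.pyGetD_natCast, PySem.List.pySetD_natCast, List.getD_cons_succ,
    List.set_cons_succ, Prod.map, id]

theorem pvInner_shift (b : String) (v : List String) :
    ∀ (ks : List Nat) (x : String) (l : List String) (c : Int),
      (ks.map (fun k : Nat => ((k : Int) + 1))).foldl (pvStepF (b :: v)) (x :: l, c)
        = ((ks.map (fun k : Nat => (k : Int))).foldl (pvStepF v) (l, c)).map (x :: ·) id := by
  intro ks
  induction ks with
  | nil => intro x l c; rfl
  | cons k ks ih =>
    intro x l c
    simp only [List.map_cons, List.foldl_cons]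
    rw [pvStepF_shift]
    have : (pvStepF v (l, c) (k : Int)).map (x :: ·) id
        = (x :: (pvStepF v (l, c) (k : Int)).1, (pvStepF v (l, c) (k : Int)).2) := rfl
    rw [this, ih]

theorem pvInner_eq : ∀ (v l : List String) (c : Int), l.length = v.length →
    ((List.range v.length).map (fun k : Nat => (k : Int))).foldl (pvStepF v) (l, c)
      = pvAddDigits l v c := by
  intro v
  induction v with
  | nil =>
    intro l c h
    have : l = [] := List.length_eq_zero_iff.mp h
    subst this
    rfl
  | cons b v ih =>
    intro l c h
    obtain ⟨x, t, rfl⟩ : ∃ x t, l = x :: t := by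
      cases l with
      | nil => simp at h
      | cons x t => exact ⟨x, t, rfl⟩
    have ht : t.length = v.length := by simpa using h
    have hset : ∀ y : String, PySem.List.pySetD (x :: t) (0 : Int) y = y :: t := by
      intro y
      simp [PySem.List.pySetD_of_nonneg]
    have e0 : pvStepF (b :: v) (x :: t, c) (0 : Int)
        = (PySem.Int.toStr (PySem.Int.mod (pvIntD x + pvIntD b + c) 10) :: t,
           PySem.Int.floordiv (pvIntD x + pvIntD b + c) 10) := by
      simp [pvStepF, hset, PySem.List.pyGetD_zero_cons]
    have hlist : (List.range (b :: v).length).map (fun k : Nat => (k : Int))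
        = (0 : Int) :: (List.range v.length).map (fun k : Nat => ((k : Int) + 1)) := by
      rw [List.length_cons, List.range_succ_eq_map, List.map_cons, List.map_map]
      congr 1
    rw [hlist, List.foldl_cons, e0, pvInner_shift, ih t _ ht]
    rfl

theorem pvAddDigits_canon : ∀ (n S V c : Nat), S < 10 ^ n → V < 10 ^ n →
    pvAddDigits (pvCanon n S) (pvCanon n V) (c : Int)
      = (pvCanon n ((S + V + c) % 10 ^ n), (((S + V + c) / 10 ^ n : Nat) : Int)) := by
  have em : ∀ m : Nat, PySem.Int.mod ((m : Nat) : Int) 10 = ((m % 10 : Nat) : Int) := fun m => by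
    exact_mod_cast PySem.Int.mod_natCast m 10
  have ef : ∀ m : Nat, PySem.Int.floordiv ((m : Nat) : Int) 10 = ((m / 10 : Nat) : Int) := fun m => by
    exact_mod_cast PySem.Int.floordiv_natCast m 10
  intro n
  induction n with
  | zero =>
    intro S V c hS hV
    simp only [pow_zero, Nat.lt_one_iff] at hS hV
    subst hS; subst hV
    simp [pvCanon, pvAddDigits]
  | succ n ih =>
    intro S V c hS hV
    have hP : 0 < 10 ^ n := Nat.pow_pos (by omega)
    have h10 : (10:Nat) ^ (n + 1) = 10 * 10 ^ n := by ring
    simp only [pvCanon, pvAddDigits]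
    rw [pvIntD_toStr_digit (Nat.mod_lt S (by omega)), pvIntD_toStr_digit (Nat.mod_lt V (by omega))]
    have eans : ((S % 10 : Nat) : Int) + ((V % 10 : Nat) : Int) + (c : Int)
        = (((S % 10 + V % 10 + c : Nat)) : Int) := by push_cast; ring
    rw [eans, em, ef]
    have hS' : S / 10 < 10 ^ n := by rw [h10] at hS; omega
    have hV' : V / 10 < 10 ^ n := by rw [h10] at hV; omega
    rw [ih (S / 10) (V / 10) ((S % 10 + V % 10 + c) / 10) hS' hV']
    set P := (10:Nat) ^ n with hPdef
    have eT : S / 10 + V / 10 + (S % 10 + V % 10 + c) / 10 = (S + V + c) / 10 := by omega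
    have e2 : (S + V + c) % (10 * P) % 10 = (S % 10 + V % 10 + c) % 10 := by
      rw [Nat.mod_mod_of_dvd _ ⟨P, rfl⟩]; omega
    have e3 : (S + V + c) % (10 * P) / 10 = (S + V + c) / 10 % P :=
      Nat.mod_mul_right_div_self _ _ _
    have e4 : (S + V + c) / (10 * P) = (S + V + c) / 10 / P := by
      rw [Nat.div_div_eq_div_mul]
    rw [h10, eT, e2, e3, e4]

-- ---- one outer step on the canonical state ----
theorem pvStep_canon (M S : Nat) (arr : List String) (h : pvAllDigit arr) :
    add_results_step (pvCanon (max M (pvNd S)) S) arr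
      = pvCanon (max (max M arr.length) (pvNd (S + pvVal arr))) (S + pvVal arr) := by
  obtain ⟨hc, hVb⟩ := pvAllDigit_canon h
  have hSb : S < 10 ^ (max M (pvNd S)) :=
    (pvLt_pow_iff_nd_le _ S).mpr (le_max_right _ _)
  have hpow : ∀ {a b : Nat}, a ≤ b → (10:Nat) ^ a ≤ 10 ^ b :=
    fun hab => Nat.pow_le_pow_right (by omega) hab
  have pad : ∀ (u k S' : Nat), S' < 10 ^ u →
      pvCanon u S' ++ List.replicate k "0" = pvCanon (u + k) S' := by
    intro u k S' hS'
    rw [pvCanon_append u k S', Nat.mod_eq_of_lt hS', Nat.div_eq_of_lt hS', pvCanon_zero]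
  set w := max M (pvNd S) with hw
  set L := arr.length with hL
  set V := pvVal arr with hV
  set T := S + V with hT
  set w' := max w L with hw'
  simp only [add_results_step, pvCanon_length]
  have hv : (if L < w then arr ++ List.replicate (w - L) "0" else arr) = pvCanon w' V := by
    by_cases hcase : L < w
    · rw [if_pos hcase, hc, pad L (w - L) V hVb]
      congr 1
      omega
    · rw [if_neg hcase, hc]
      congr 1
      omega
  have hst1 : (if w < L then pvCanon w S ++ List.replicate (L - w) "0" else pvCanon w S)
      = pvCanon w' S := by
    by_cases hcase : w < L
    · rw [if_pos hcase, pad w (L - w) S hSb]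
      congr 1
      omega
    · rw [if_neg hcase]
      congr 1
      omega
  rw [hv, hst1]
  have hlenv : PySem.List.len (pvCanon w' V) = ((w' : Nat) : Int) := by
    rw [PySem.List.len_eq, pvCanon_length]
  rw [hlenv, PySem.List.pyRange_zero_natCast]
  have hinner := pvInner_eq (pvCanon w' V) (pvCanon w' S) 0 (by rw [pvCanon_length, pvCanon_length])
  rw [pvCanon_length] at hinner
  rw [hinner]
  have hS' : S < 10 ^ w' := lt_of_lt_of_le hSb (hpow (le_max_left _ _))
  have hV' : V < 10 ^ w' := lt_of_lt_of_le hVb (hpow (le_max_right _ _))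
  have hadd := pvAddDigits_canon w' S V 0 hS' hV'
  rw [show (((0:Nat)) : Int) = (0 : Int) from rfl] at hadd
  rw [hadd, show S + V + 0 = T from by omega]
  have hpos : 0 < (10:Nat) ^ w' := Nat.pow_pos (by omega)
  have hT2 : T < 2 * 10 ^ w' := by omega
  have hq : T / 10 ^ w' < 2 := by
    rw [Nat.div_lt_iff_lt_mul hpos]
    omega
  by_cases hq0 : T / 10 ^ w' = 0
  · rw [hq0]
    have hTlt : T < 10 ^ w' := by
      by_contra hge
      have h1 : 1 ≤ T / 10 ^ w' := (Nat.one_le_div_iff hpos).mpr (by omega)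
      omega
    rw [Nat.mod_eq_of_lt hTlt]
    rw [if_neg (by norm_num)]
    show pvCanon w' T = pvCanon (max (max M L) (pvNd T)) T
    congr 1
    have f2 : pvNd T ≤ w' := (pvLt_pow_iff_nd_le _ _).mp hTlt
    have f3 : pvNd S ≤ pvNd T := pvNd_mono (by rw [hT]; omega)
    have hMw : M ≤ w := by rw [hw]; exact le_max_left _ _
    have hww' : w ≤ w' := by rw [hw']; exact le_max_left _ _
    have hLw' : L ≤ w' := by rw [hw']; exact le_max_right _ _
    apply Nat.le_antisymm
    · have h1' : M ≤ max (max M L) (pvNd T) := le_trans (le_max_left M L) (le_max_left _ _)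
      have h2' : L ≤ max (max M L) (pvNd T) := le_trans (le_max_right M L) (le_max_left _ _)
      have h3' : pvNd S ≤ max (max M L) (pvNd T) := le_trans f3 (le_max_right _ _)
      have h4' : w ≤ max (max M L) (pvNd T) := by rw [hw]; exact max_le h1' h3'
      rw [hw']
      exact max_le h4' h2'
    · exact max_le (max_le (le_trans hMw hww') hLw') f2
  · have hq1 : T / 10 ^ w' = 1 :=
      Nat.le_antisymm (Nat.lt_succ_iff.mp hq) (Nat.one_le_iff_ne_zero.mpr hq0)
    rw [hq1, if_pos (by norm_num)]
    have hge : 10 ^ w' ≤ T := by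
      by_contra hlt
      rw [Nat.div_eq_of_lt (by omega)] at hq1
      omega
    have hlt : T < 10 ^ (w' + 1) := by
      have hpow1 : (10:Nat) ^ (w' + 1) = 10 * 10 ^ w' := by ring
      omega
    have h1 : pvNd T ≤ w' + 1 := (pvLt_pow_iff_nd_le _ T).mp hlt
    have h3 : ¬ pvNd T ≤ w' := fun hh => by
      have := (pvLt_pow_iff_nd_le w' T).mpr hh
      omega
    have f3 : pvNd S ≤ pvNd T := pvNd_mono (by rw [hT]; omega)
    have hcan : pvCanon w' (T % 10 ^ w') ++ [PySem.Int.toStr ((1:Nat) : Int)]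
        = pvCanon (w' + 1) T := by
      rw [pvCanon_append w' 1 T, hq1]
      rfl
    show pvCanon w' (T % 10 ^ w') ++ [PySem.Int.toStr ((1 : Nat) : Int)]
        = pvCanon (max (max M L) (pvNd T)) T
    rw [hcan]
    congr 1
    have hMw : M ≤ w := by rw [hw]; exact le_max_left _ _
    have hww' : w ≤ w' := by rw [hw']; exact le_max_left _ _
    have hLw' : L ≤ w' := by rw [hw']; exact le_max_right _ _
    have hndT : pvNd T = w' + 1 := by omega
    rw [hndT]
    exact (Nat.max_eq_right (max_le (by omega) (by omega))).symm

theorem pvOuter_inv : ∀ (rest : List (List String)) (M S : Nat),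
    (∀ arr ∈ rest, pvAllDigit arr) →
    rest.foldl add_results_step (pvCanon (max M (pvNd S)) S)
      = pvCanon (max (pvMaxLen M rest) (pvNd (S + pvSum rest))) (S + pvSum rest) := by
  intro rest
  induction rest with
  | nil =>
    intro M S _
    simp [pvMaxLen, pvSum]
  | cons a t ih =>
    intro M S hall
    rw [List.foldl_cons, pvStep_canon M S a (hall a List.mem_cons_self),
      ih (max M a.length) (S + pvVal a) (fun arr har => hall arr (List.mem_cons_of_mem _ har))]
    have e1 : S + pvVal a + pvSum t = S + pvSum (a :: t) := by
      simp [pvSum]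
      omega
    have e2 : pvMaxLen (max M a.length) t = pvMaxLen M (a :: t) := rfl
    rw [e1, e2]

-- ---- B-side evaluation ----
theorem pvAlt_arr : ∀ (arr : List String), pvAllDigit arr → ∀ (k : Nat),
    ((PySem.List.enumerate arr (k : Int)).map (fun p => pvIntD p.2 * 10 ^ p.1.toNat)).sum
      = (pvVal arr : Int) * 10 ^ k := by
  intro arr
  induction arr with
  | nil =>
    intro _ k
    simp [PySem.List.enumerate_nil, pvVal]
  | cons s t ih =>
    intro h k
    have hs := pvIntD_digit (h s List.mem_cons_self)
    rw [PySem.List.enumerate_cons, List.map_cons, List.sum_cons]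
    have ecast : ((k : Int) + 1) = (((k + 1 : Nat)) : Int) := by push_cast; ring
    rw [ecast, ih (fun x hx => h x (List.mem_cons_of_mem _ hx)) (k + 1)]
    show pvIntD s * 10 ^ ((k : Int)).toNat + (pvVal t : Int) * 10 ^ (k + 1)
        = ((pvVal (s :: t) : Nat) : Int) * 10 ^ k
    rw [Int.toNat_natCast, hs.1]
    show ((((pvIntD s).toNat : Nat)) : Int) * 10 ^ k + (pvVal t : Int) * 10 ^ (k + 1)
        = (((pvIntD s).toNat + 10 * pvVal t : Nat) : Int) * 10 ^ k
    push_cast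
    ring

theorem pvValue_eq (arr : List String) (h : pvAllDigit arr) : pvValue arr = (pvVal arr : Int) := by
  unfold pvValue
  have := pvAlt_arr arr h 0
  rw [show ((0 : Nat) : Int) = (0 : Int) from rfl] at this
  simpa using this

theorem pvToStr_mem {d : Nat} (h : d < 10) : PySem.Int.toStr ((d : Nat) : Int) ∈ pvDigitStrs := by
  interval_cases d <;> decide

theorem pvCanon_allDigit : ∀ (w S : Nat), pvAllDigit (pvCanon w S) := by
  intro w
  induction w with
  | zero => intro S s hs; simp [pvCanon] at hs
  | succ w ih =>
    intro S s hs
    rcases List.mem_cons.mp hs with rfl | hm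
    · exact pvToStr_mem (Nat.mod_lt S (by omega))
    · exact ih (S / 10) s hm

theorem pvVal_canon : ∀ (w S : Nat), S < 10 ^ w → pvVal (pvCanon w S) = S := by
  intro w
  induction w with
  | zero =>
    intro S hS
    simp only [pow_zero, Nat.lt_one_iff] at hS
    subst hS
    rfl
  | succ w ih =>
    intro S hS
    have hS' : S / 10 < 10 ^ w := by
      have h10 : (10:Nat) ^ (w + 1) = 10 * 10 ^ w := by ring
      rw [h10] at hS
      omega
    show (pvIntD (PySem.Int.toStr ((S % 10 : Nat) : Int))).toNat + 10 * pvVal (pvCanon w (S / 10)) = S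
    rw [pvIntD_toStr_digit (Nat.mod_lt S (by omega)), ih (S / 10) hS', Int.toNat_natCast]
    omega

-- B's to_digits produces exactly the canonical digit list, widened to the sum's digit count
theorem pvToDigitsB_canon : ∀ (k : Nat) (width : Int) (n : Nat), width.toNat + n ≤ k →
    pvToDigitsB width ((n : Nat) : Int) = pvCanon (max width.toNat (pvNd n)) n := by
  intro k
  induction k with
  | zero =>
    intro width n hk
    have hw : width.toNat = 0 := by omega
    have hn : n = 0 := by omega
    subst hn
    rw [pvToDigitsB]
    rw [if_pos ⟨by omega, by omega⟩, hw]
    rfl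
  | succ k ih =>
    intro width n hk
    rw [pvToDigitsB]
    by_cases hg : width ≤ 0 ∧ ((n : Nat) : Int) ≤ 0
    · rw [if_pos hg]
      have hn : n = 0 := by omega
      have hw : width.toNat = 0 := by omega
      subst hn
      rw [hw]
      rfl
    · rw [if_neg hg]
      have hmod : PySem.Int.mod ((n : Nat) : Int) 10 = ((n % 10 : Nat) : Int) := by
        exact_mod_cast PySem.Int.mod_natCast n 10
      have hdiv : PySem.Int.floordiv ((n : Nat) : Int) 10 = ((n / 10 : Nat) : Int) := by
        exact_mod_cast PySem.Int.floordiv_natCast n 10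
      have hrec : (width - 1).toNat + n / 10 ≤ k := by
        rcases not_and_or.mp hg with hbig | hpos
        · omega
        · have : 0 < n := by omega
          omega
      rw [hmod, hdiv, ih (width - 1) (n / 10) hrec]
      have hW : max width.toNat (pvNd n) = max (width - 1).toNat (pvNd (n / 10)) + 1 := by
        have ht : (width - 1).toNat = width.toNat - 1 := by omega
        rw [ht]
        by_cases hn0 : n = 0
        · subst hn0
          have ha : 0 < width.toNat := by omega
          rw [show pvNd 0 = 0 from (pvNd_eq_zero_iff 0).mpr rfl]
          simp only [Nat.max_def]
          split_ifs <;> omega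
        · by_cases hsm : n < 10
          · rw [pvNd_small (by omega) hsm, Nat.div_eq_of_lt hsm,
              show pvNd 0 = 0 from (pvNd_eq_zero_iff 0).mpr rfl]
            simp only [Nat.max_def]
            split_ifs <;> omega
          · rw [pvNd_step (by omega)]
            have hnd1 : 1 ≤ pvNd (n / 10) := by
              have := (pvNd_eq_zero_iff (n / 10)).not.mpr (by omega)
              omega
            simp only [Nat.max_def]
            split_ifs <;> omega
      rw [hW]
      rfl

-- a max identity used to line the two step widths up
theorem pvMaxAbsorb {a b c d : Nat} (h : b ≤ d) :
    max (max (max a b) c) d = max (max a c) d := by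
  simp only [Nat.max_def]
  split_ifs <;> omega

-- B's step on the canonical state produces exactly A's canonical state
theorem pvAltStep_canon (M S : Nat) (arr : List String) (h : pvAllDigit arr) :
    pvAltStep (pvCanon (max M (pvNd S)) S) arr
      = pvCanon (max (max M arr.length) (pvNd (S + pvVal arr))) (S + pvVal arr) := by
  set w := max M (pvNd S) with hw
  set L := arr.length with hL
  set V := pvVal arr with hV
  set T := S + V with hT
  have hSb : S < 10 ^ w := (pvLt_pow_iff_nd_le _ S).mpr (le_max_right _ _)
  have hvals : pvValue (pvCanon w S) + pvValue arr = ((T : Nat) : Int) := by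
    rw [pvValue_eq _ (pvCanon_allDigit w S), pvValue_eq arr h, pvVal_canon w S hSb,
      hT, hV]
    push_cast
    ring
  have hlens : max (PySem.List.len (pvCanon w S)) (PySem.List.len arr)
      = ((max w L : Nat) : Int) := by
    rw [PySem.List.len_eq, PySem.List.len_eq, pvCanon_length, hw, hL]
    push_cast
    ring_nf
  unfold pvAltStep
  rw [hvals, hlens, pvToDigitsB_canon ((((max w L : Nat) : Int)).toNat + T) _ T (by omega)]
  rw [Int.toNat_natCast]
  congr 1
  have hnd : pvNd S ≤ pvNd T := pvNd_mono (by omega)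
  calc max (max w L) (pvNd T) = max (max (max M (pvNd S)) L) (pvNd T) := by rw [hw]
    _ = max (max M L) (pvNd T) := pvMaxAbsorb hnd

-- B's outer fold keeps the same canonical state as A's
theorem pvAltOuter_inv : ∀ (rest : List (List String)) (M S : Nat),
    (∀ arr ∈ rest, pvAllDigit arr) →
    rest.foldl pvAltStep (pvCanon (max M (pvNd S)) S)
      = pvCanon (max (pvMaxLen M rest) (pvNd (S + pvSum rest))) (S + pvSum rest) := by
  intro rest
  induction rest with
  | nil =>
    intro M S _
    simp [pvMaxLen, pvSum]
  | cons a t ih =>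
    intro M S hall
    rw [List.foldl_cons, pvAltStep_canon M S a (hall a List.mem_cons_self),
      ih (max M a.length) (S + pvVal a) (fun arr har => hall arr (List.mem_cons_of_mem _ har))]
    have e1 : S + pvVal a + pvSum t = S + pvSum (a :: t) := by
      simp [pvSum]
      omega
    have e2 : pvMaxLen (max M a.length) t = pvMaxLen M (a :: t) := rfl
    rw [e1, e2]

-- ===== VERDICT (by name: the statement is the Claim_ definition above) =====
theorem add_results_spec : Claim_equal_add_results := by
  unfold Claim_equal_add_results
  intro results _ hpre
  unfold Spec_add_results
  obtain ⟨hne, hdisj⟩ := hpre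
  obtain ⟨a0, rest, rfl⟩ : ∃ a0 rest, results = a0 :: rest := by
    cases results with
    | nil => exact absurd rfl hne
    | cons a t => exact ⟨a, t, rfl⟩
  by_cases hone : rest = []
  · subst hone
    simp only [add_results, add_results_alt, PySem.List.pyGetD_zero_cons,
      PySem.List.slice_from_one, List.tail_cons, List.foldl_nil,
      PySem.List.slice?_none_none_neg_one, Option.getD_some]
  · have hall : ∀ arr ∈ a0 :: rest, ∀ s ∈ arr, s ∈ pvDigitStrs := by
      rcases hdisj with h1 | h2
      · exfalso
        rw [List.length_cons] at h1
        have : rest.length = 0 := by omega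
        exact hone (List.length_eq_zero_iff.mp this)
      · exact h2
    have ha0 := pvAllDigit_canon (fun s hs => hall a0 List.mem_cons_self s hs)
    have hbase : pvCanon a0.length (pvVal a0) = pvCanon (max a0.length (pvNd (pvVal a0))) (pvVal a0) := by
      have : pvNd (pvVal a0) ≤ a0.length := (pvLt_pow_iff_nd_le _ _).mp ha0.2
      rw [max_eq_left this]
    set L0 := a0.length with hL0
    set S0 := pvVal a0 with hS0
    set T := S0 + pvSum rest with hT
    set W := max (pvMaxLen L0 rest) (pvNd T) with hW
    have hallr : ∀ arr ∈ rest, pvAllDigit arr :=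
      fun arr har s hs => hall arr (List.mem_cons_of_mem _ har) s hs
    have hA : add_results (a0 :: rest) = PySem.Str.join "" ((pvCanon W T).reverse) := by
      simp only [add_results, PySem.List.pyGetD_zero_cons, PySem.List.slice_from_one,
        List.tail_cons]
      rw [show a0 = pvCanon L0 S0 from ha0.1, hbase, pvOuter_inv rest L0 S0 hallr,
        PySem.List.slice?_none_none_neg_one, Option.getD_some]
    have hB : add_results_alt (a0 :: rest) = PySem.Str.join "" ((pvCanon W T).reverse) := by
      simp only [add_results_alt, PySem.List.pyGetD_zero_cons, PySem.List.slice_from_one,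
        List.tail_cons]
      rw [show a0 = pvCanon L0 S0 from ha0.1, hbase, pvAltOuter_inv rest L0 S0 hallr]
    rw [hA, hB]
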